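-- pv_equiv track=rewrite | github.com/eanorambuena/PTK_SignificantFiguresCalculator | SFCLibrary.py | op
-- ===== SOURCE A (Python) =====
-- def op(x): #operations' priority
--   c=0
--   d=[]
--   for i in x:
--     if c%2==1:
--       if i=='*' or i=='/':
--         d.append(c)
--     c+=1
--   c=0
--   for i in x:
--     if c%2==1:
--       if i=='+' or i=='-':
--         d.append(c)
--     c+=1
--   return d
-- ===== SOURCE B (Python) =====
-- def op(x):  # operations' priority: one pass, two accumulators
--     muldiv = []
--     addsub = []
--     for i, t in enumerate(x):
--         if i % 2 == 1 and (t == '*' or t == '/'):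
--             muldiv.append(i)
--         elif i % 2 == 1 and (t == '+' or t == '-'):
--             addsub.append(i)
--     return muldiv + addsub
-- ===== Notes on version B (the rewrite author's own statement) =====
-- stated objective: simpler
-- what changed: A scans the list twice (once for '*'/'/', once for '+'/'-'); B makes a single enumerate pass maintaining two partitioned accumulators and concatenates them, preserving the exact order.
import Mathlib
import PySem

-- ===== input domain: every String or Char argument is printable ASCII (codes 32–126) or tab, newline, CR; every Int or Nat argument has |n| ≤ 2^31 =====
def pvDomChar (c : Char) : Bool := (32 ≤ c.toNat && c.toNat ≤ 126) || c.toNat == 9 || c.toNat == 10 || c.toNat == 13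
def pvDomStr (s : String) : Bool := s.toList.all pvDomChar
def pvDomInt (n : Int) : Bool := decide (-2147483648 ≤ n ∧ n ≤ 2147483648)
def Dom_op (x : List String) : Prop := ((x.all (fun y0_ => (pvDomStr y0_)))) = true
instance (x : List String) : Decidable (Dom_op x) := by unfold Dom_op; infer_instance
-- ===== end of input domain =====

-- B replaces A's two full scans by one enumerate pass with two partitioned accumulators (simpler).

-- ===== PORT A =====
-- first loop: append odd counters whose element is '*' or '/'
def opPass1 (s : Int × List Int) (i : String) : Int × List Int :=
  let d := if PySem.Int.mod s.1 2 = 1 then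
             (if i = "*" ∨ i = "/" then s.2 ++ [s.1] else s.2)
           else s.2
  (s.1 + 1, d)

-- second loop: append odd counters whose element is '+' or '-'
def opPass2 (s : Int × List Int) (i : String) : Int × List Int :=
  let d := if PySem.Int.mod s.1 2 = 1 then
             (if i = "+" ∨ i = "-" then s.2 ++ [s.1] else s.2)
           else s.2
  (s.1 + 1, d)

def op (x : List String) : List Int :=
  let s1 := x.foldl opPass1 ((0 : Int), ([] : List Int))
  let s2 := x.foldl opPass2 ((0 : Int), s1.2)
  s2.2

-- ===== PORT B =====
-- single pass over enumerate(x): state = (muldiv, addsub)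
def opStep (s : List Int × List Int) (p : Int × String) : List Int × List Int :=
  if PySem.Int.mod p.1 2 = 1 ∧ (p.2 = "*" ∨ p.2 = "/") then (s.1 ++ [p.1], s.2)
  else if PySem.Int.mod p.1 2 = 1 ∧ (p.2 = "+" ∨ p.2 = "-") then (s.1, s.2 ++ [p.1])
  else s

def op_alt (x : List String) : List Int :=
  let r := (PySem.List.enumerate x).foldl opStep (([] : List Int), ([] : List Int))
  r.1 ++ r.2

-- ===== PRECONDITION & SPEC =====
def Spec_op (x : List String) (out : List Int) : Prop := out = op_alt x
instance (x : List String) (out : List Int) : Decidable (Spec_op x out) := by unfold Spec_op; infer_instance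

-- ===== CLAIM (what is proved, stated in full; the proofs are below) =====
def Claim_equal_op : Prop := ∀ (x : List String), Dom_op x → Spec_op x (op x)

-- ===== LEMMAS AND PROOFS =====

-- what pass 1 collects from position c onwards
def collMD (x : List String) (c : Int) : List Int :=
  match x with
  | [] => []
  | i :: t => (if PySem.Int.mod c 2 = 1 ∧ (i = "*" ∨ i = "/") then [c] else []) ++ collMD t (c + 1)

def collAS (x : List String) (c : Int) : List Int :=
  match x with
  | [] => []
  | i :: t => (if PySem.Int.mod c 2 = 1 ∧ (i = "+" ∨ i = "-") then [c] else []) ++ collAS t (c + 1)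

theorem foldl_pass1 (x : List String) (c : Int) (d : List Int) :
    x.foldl opPass1 (c, d) = (c + x.length, d ++ collMD x c) := by
  induction x generalizing c d with
  | nil => simp [collMD]
  | cons i t ih =>
    simp only [List.foldl_cons, opPass1, collMD, ih]
    split_ifs with h1 h2 h3 <;> simp_all <;> omega

theorem foldl_pass2 (x : List String) (c : Int) (d : List Int) :
    x.foldl opPass2 (c, d) = (c + x.length, d ++ collAS x c) := by
  induction x generalizing c d with
  | nil => simp [collAS]
  | cons i t ih =>
    simp only [List.foldl_cons, opPass2, collAS, ih]
    split_ifs with h1 h2 h3 <;> simp_all <;> omega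

theorem foldl_enum (x : List String) (n : Int) (md as : List Int) :
    (PySem.List.enumerate x n).foldl opStep (md, as)
      = (md ++ collMD x n, as ++ collAS x n) := by
  induction x generalizing n md as with
  | nil => simp [PySem.List.enumerate_nil, collMD, collAS]
  | cons i t ih =>
    rw [PySem.List.enumerate_cons]
    simp only [List.foldl_cons, opStep, collMD, collAS]
    split_ifs with h1 h2 <;>
      first
        | (exfalso; rcases h1.2 with rfl | rfl <;> rcases h2.2 with h | h <;> simp_all)
        | simp [ih]

theorem op_eq_alt (x : List String) : op x = op_alt x := by
  unfold op op_alt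
  have h1 := foldl_pass1 x 0 []
  have h2 := foldl_pass2 x 0 (collMD x 0)
  have h3 := foldl_enum x 0 [] []
  simp [h1, h2, h3]

-- ===== VERDICT (by name: the statement is the Claim_ definition above) =====
theorem op_spec : Claim_equal_op := by
  intro x _
  unfold Spec_op
  exact op_eq_alt x
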